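-- pv_equiv track=rewrite | github.com/k-papadakis/advent-of-code | 2022/day_24/solution.py | find_blizzards_till_repeat
-- ===== SOURCE A (Python) =====
-- from math import lcm
--
-- def advance_grid(grid: list[list[str]]) -> list[list[str]]:
--     m, n = len(grid), len(grid[0])
--     new_grid: list[list[str]] = [["" for _ in range(n)] for _ in range(m)]
--     for i in range(1, m - 1):
--         for j in range(1, n - 1):
--             for d in grid[i][j]:
--                 match d:
--                     case "^":
--                         new_i = i - 1 if i > 1 else m - 2
--                         new_grid[new_i][j] += "^"
--                     case "v":
--                         new_i = i + 1 if i < m - 2 else 1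
--                         new_grid[new_i][j] += "v"
--                     case "<":
--                         new_j = j - 1 if j > 1 else n - 2
--                         new_grid[i][new_j] += "<"
--                     case ">":
--                         new_j = j + 1 if j < n - 2 else 1
--                         new_grid[i][new_j] += ">"
--                     case _:
--                         raise ValueError(f"Invalid direction: {d}")
--     return new_grid
--
-- def find_blizzards_till_repeat(grid: list[str]) -> list[list[list[bool]]]:
--     m, n = len(grid), len(grid[0])
--     has_blizzard: list[list[list[bool]]] = []
--     g = [["" if grid[i][j] == "." else grid[i][j] for j in range(n)] for i in range(m)]
--     has_blizzard.append([[len(g[i][j]) > 0 for j in range(n)] for i in range(m)])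
--     for _ in range(lcm(m - 2, n - 2) - 1):
--         g = advance_grid(g)
--         has_blizzard.append([[len(g[i][j]) > 0 for j in range(n)] for i in range(m)])
--     return has_blizzard
-- ===== SOURCE B (Python) =====
-- from math import lcm
--
--
-- def find_blizzards_till_repeat(grid: list[str]) -> list[list[list[bool]]]:
--     m, n = len(grid), len(grid[0])
--     H, W = m - 2, n - 2
--     result = [[[grid[i][j] != "." for j in range(n)] for i in range(m)]]
--     for t in range(1, lcm(H, W)):
--         result.append(
--             [
--                 [
--                     1 <= i <= m - 2
--                     and 1 <= j <= n - 2
--                     and (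
--                         grid[i][1 + (j - 1 + t) % W] == "<"
--                         or grid[i][1 + (j - 1 - t) % W] == ">"
--                         or grid[1 + (i - 1 + t) % H][j] == "^"
--                         or grid[1 + (i - 1 - t) % H][j] == "v"
--                     )
--                     for j in range(n)
--                 ]
--                 for i in range(m)
--             ]
--         )
--     return result
-- ===== Notes on version B (the rewrite author's own statement) =====
-- stated objective: alternative
-- what changed: B replaces A's step-by-step simulation (repeatedly advancing a grid of blizzard strings and recording occupancy) by a closed-form construction that computes every frame t directly from the initial grid with four modular-displacement lookups per interior cell.
import Mathlib
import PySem

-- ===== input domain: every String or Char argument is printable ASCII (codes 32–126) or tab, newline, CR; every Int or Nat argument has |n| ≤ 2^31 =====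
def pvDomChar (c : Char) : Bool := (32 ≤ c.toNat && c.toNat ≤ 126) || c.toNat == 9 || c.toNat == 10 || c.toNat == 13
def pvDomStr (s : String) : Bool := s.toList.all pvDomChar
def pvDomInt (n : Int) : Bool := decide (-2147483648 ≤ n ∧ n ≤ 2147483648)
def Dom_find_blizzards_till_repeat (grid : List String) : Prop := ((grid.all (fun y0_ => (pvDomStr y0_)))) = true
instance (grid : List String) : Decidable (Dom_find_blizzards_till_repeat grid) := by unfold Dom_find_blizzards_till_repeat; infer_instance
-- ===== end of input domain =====

-- B replaces A's step-by-step blizzard simulation by a closed-form modular-displacement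
-- lookup computing every frame directly from the initial grid (objective: alternative).

-- grid[i][j] for a list of strings (both ports and Pre_ read cells this way; on inputs
-- admitted by Pre_ every such access is in range, where Python indexing returns normally).
def pvChar (grid : List String) (i j : Nat) : Char := ((grid.getD i "").toList.getD j ' ')

-- ===== PORT A =====

-- g[i][j] for the working grid of cell strings (strings ported as List Char).
def pvCell (g : List (List (List Char))) (i j : Nat) : List Char := (g.getD i []).getD j []

-- new_grid[i][j] += c  (Python list mutation, ported as a functional update).
def pvUpd (g : List (List (List Char))) (i j : Nat) (c : Char) : List (List (List Char)) :=
  g.set i ((g.getD i []).set j (pvCell g i j ++ [c]))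

def advance_grid (g : List (List (List Char))) : List (List (List Char)) :=
  let m := g.length
  let n := (g.headD []).length
  (List.range' 1 (m - 2)).foldl (fun acc i =>
    (List.range' 1 (n - 2)).foldl (fun acc j =>
      (pvCell g i j).foldl (fun acc d =>
        match d with
        | '^' => pvUpd acc (if 1 < i then i - 1 else m - 2) j '^'
        | 'v' => pvUpd acc (if i < m - 2 then i + 1 else 1) j 'v'
        | '<' => pvUpd acc i (if 1 < j then j - 1 else n - 2) '<'
        | '>' => pvUpd acc i (if j < n - 2 then j + 1 else 1) '>'
        | _ => acc  -- Python: raise ValueError (invalid direction); excluded by Pre_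
        ) acc) acc)
    (List.replicate m (List.replicate n ([] : List Char)))

-- [[len(g[i][j]) > 0 for j in range(n)] for i in range(m)]
def pvFrame (m n : Nat) (g : List (List (List Char))) : List (List Bool) :=
  (List.range m).map fun i => (List.range n).map fun j => decide (0 < (pvCell g i j).length)

def find_blizzards_till_repeat (grid : List String) : List (List (List Bool)) :=
  let m := grid.length
  let n := (grid.headD "").length  -- len(grid[0]); IndexError on [] is excluded by Pre_
  let g0 : List (List (List Char)) :=
    (List.range m).map fun i => (List.range n).map fun j =>
      if pvChar grid i j = '.' then ([] : List Char) else [pvChar grid i j]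
  -- for _ in range(lcm(m-2, n-2) - 1): g = advance_grid(g); has_blizzard.append(...)
  ((List.range (Int.lcm ((m : Int) - 2) ((n : Int) - 2) - 1)).foldl
      (fun (st : List (List (List Char)) × List (List (List Bool))) _ =>
        let g' := advance_grid st.1
        (g', st.2 ++ [pvFrame m n g']))
      (g0, [pvFrame m n g0])).2

-- ===== PORT B =====

-- wrap(size, x) = 1 + (x - 1) % size  (returned as the Nat index it is used as;
-- nonnegative whenever size > 0, which holds at every call B makes).
def pvWrap (size x : Int) : Nat := (1 + PySem.Int.mod (x - 1) size).toNat

def find_blizzards_till_repeat_alt (grid : List String) : List (List (List Bool)) :=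
  let m := grid.length
  let n := (grid.headD "").length  -- len(grid[0]); IndexError on [] is excluded by Pre_
  let H : Int := (m : Int) - 2
  let W : Int := (n : Int) - 2
  ((List.range m).map fun i => (List.range n).map fun j => decide (pvChar grid i j ≠ '.')) ::
  (List.range' 1 (Int.lcm H W - 1)).map fun (t : Nat) =>
    (List.range m).map fun i => (List.range n).map fun j =>
      decide (1 ≤ i ∧ i ≤ m - 2 ∧ 1 ≤ j ∧ j ≤ n - 2 ∧
        (pvChar grid i (pvWrap W ((j : Int) + (t : Int))) = '<' ∨
         pvChar grid i (pvWrap W ((j : Int) - (t : Int))) = '>' ∨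
         pvChar grid (pvWrap H ((i : Int) + (t : Int))) j = '^' ∨
         pvChar grid (pvWrap H ((i : Int) - (t : Int))) j = 'v'))

-- ===== PRECONDITION & SPEC =====

-- Pre_ excludes exactly the inputs where Python A raises: the empty grid and rows shorter
-- than the first row (IndexError), and grids whose interior holds a character other than
-- '.', '^', 'v', '<', '>' when the advancing loop runs at least once (ValueError).
def Pre_find_blizzards_till_repeat (grid : List String) : Prop :=
  grid ≠ [] ∧
  (∀ s ∈ grid, (grid.headD "").length ≤ s.length) ∧
  (2 ≤ Int.lcm ((grid.length : Int) - 2) (((grid.headD "").length : Int) - 2) →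
    ∀ i ∈ List.range' 1 (grid.length - 2),
      ∀ j ∈ List.range' 1 ((grid.headD "").length - 2),
        pvChar grid i j ∈ (['.', '^', 'v', '<', '>'] : List Char))
instance (grid : List String) : Decidable (Pre_find_blizzards_till_repeat grid) := by
  unfold Pre_find_blizzards_till_repeat; infer_instance

def pvWitness_find_blizzards_till_repeat : List String := ["....", ".<v.", "...."]

def Spec_find_blizzards_till_repeat (grid : List String) (out : List (List (List Bool))) : Prop := out = find_blizzards_till_repeat_alt grid
instance (grid : List String) (out : List (List (List Bool))) : Decidable (Spec_find_blizzards_till_repeat grid out) := by unfold Spec_find_blizzards_till_repeat; infer_instance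

-- ===== CLAIM (what is proved, stated in full; the proofs are below) =====
def Claim_equal_find_blizzards_till_repeat : Prop := ∀ (grid : List String), Dom_find_blizzards_till_repeat grid → Pre_find_blizzards_till_repeat grid → Spec_find_blizzards_till_repeat grid (find_blizzards_till_repeat grid)

-- ===== LEMMAS AND PROOFS =====

-- The four arrow characters.
def pvA4 : List Char := ['^', 'v', '<', '>']

-- Target cell of one blizzard move (the cell advance_grid appends to).
def pvTgt (m n : Nat) (e : Nat × Nat × Char) : Nat × Nat :=
  match e.2.2 with
  | '^' => (if 1 < e.1 then e.1 - 1 else m - 2, e.2.1)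
  | 'v' => (if e.1 < m - 2 then e.1 + 1 else 1, e.2.1)
  | '<' => (e.1, if 1 < e.2.1 then e.2.1 - 1 else n - 2)
  | '>' => (e.1, if e.2.1 < n - 2 then e.2.1 + 1 else 1)
  | _ => (0, 0)

-- One event of advance_grid's triple loop, as a state step.
def pvStepE (m n : Nat) (acc : List (List (List Char))) (e : Nat × Nat × Char) :
    List (List (List Char)) :=
  match e with
  | (i, j, d) =>
    match d with
    | '^' => pvUpd acc (if 1 < i then i - 1 else m - 2) j '^'
    | 'v' => pvUpd acc (if i < m - 2 then i + 1 else 1) j 'v'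
    | '<' => pvUpd acc i (if 1 < j then j - 1 else n - 2) '<'
    | '>' => pvUpd acc i (if j < n - 2 then j + 1 else 1) '>'
    | _ => acc

-- The flattened event list of advance_grid's triple loop.
def pvE (g : List (List (List Char))) (m n : Nat) : List (Nat × Nat × Char) :=
  (List.range' 1 (m - 2)).flatMap fun i =>
    (List.range' 1 (n - 2)).flatMap fun j =>
      (pvCell g i j).map fun d => (i, j, d)

-- Expected multiplicity of arrow c in interior cell (i,j) after t steps.
def pvEc (grid : List String) (m n t i j : Nat) (c : Char) : Nat :=
  if c = '<' then (if pvChar grid i (pvWrap ((n : Int) - 2) ((j : Int) + (t : Int))) = '<' then 1 else 0)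
  else if c = '>' then (if pvChar grid i (pvWrap ((n : Int) - 2) ((j : Int) - (t : Int))) = '>' then 1 else 0)
  else if c = '^' then (if pvChar grid (pvWrap ((m : Int) - 2) ((i : Int) + (t : Int))) j = '^' then 1 else 0)
  else if c = 'v' then (if pvChar grid (pvWrap ((m : Int) - 2) ((i : Int) - (t : Int))) j = 'v' then 1 else 0)
  else 0

-- --- generic list access lemmas ---

theorem pv_getD_set {α : Type} (g : List α) (a p : Nat) (r d : α) :
    (g.set a r).getD p d = if a = p ∧ a < g.length then r else g.getD p d := by
  rcases eq_or_ne a p with rfl | h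
  · by_cases hl : a < g.length
    · simp [List.getD, hl]
    · rw [List.set_eq_of_length_le (by omega)]
      simp [hl]
  · simp [List.getD, List.getElem?_set_ne h, h]

theorem pv_getD_map_range {α : Type} (f : Nat → α) (m i : Nat) (h : i < m) (d : α) :
    ((List.range m).map f).getD i d = f i := by
  simp [List.getD, h]

theorem pv_headD_eq_getD {α : Type} (l : List α) (d : α) : l.headD d = l.getD 0 d := by
  cases l <;> rfl

theorem pv_countP_flatMap {α β : Type} (l : List α) (f : α → List β) (p : β → Bool) :
    (l.flatMap f).countP p = (l.map fun a => (f a).countP p).sum := by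
  induction l with
  | nil => rfl
  | cons a l ih => simp [List.flatMap_cons, List.countP_append, ih]

theorem pv_sum_map_ite (l : List Nat) (hl : l.Nodup) (a : Nat) (ha : a ∈ l)
    (v : Nat) (f : Nat → Nat) (hf : ∀ x ∈ l, f x = if x = a then v else 0) :
    (l.map f).sum = v := by
  induction l with
  | nil => simp at ha
  | cons b l ih =>
    by_cases hba : b = a
    · subst hba
      have hz : (l.map f).sum = 0 := by
        rw [List.sum_eq_zero]
        intro y hy
        rcases List.mem_map.1 hy with ⟨x, hx, rfl⟩
        have hxb : x ≠ b := by rintro rfl; exact (List.nodup_cons.1 hl).1 hx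
        simpa [hxb] using hf x (List.mem_cons_of_mem _ hx)
      simp [hz, hf b (List.mem_cons_self ..)]
    · have hfb : f b = 0 := by simpa [hba] using hf b (List.mem_cons_self ..)
      have hmem : a ∈ l := by
        rcases List.mem_cons.1 ha with h | h
        · exact absurd h.symm hba
        · exact h
      rw [List.map_cons, List.sum_cons, hfb, zero_add]
      exact ih (List.nodup_cons.1 hl).2 hmem fun x hx => hf x (List.mem_cons_of_mem _ hx)

theorem pv_eq_nil_of_count (l : List Char) (h : ∀ c, l.count c = 0) : l = [] := by
  cases l with
  | nil => rfl
  | cons a t => have := h a; simp at this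

theorem pv_cells_arrow_of_counts (l : List Char) (h : ∀ c, c ∉ pvA4 → l.count c = 0) :
    ∀ d ∈ l, d ∈ pvA4 := by
  intro d hd
  by_contra hna
  have := h d hna
  rw [← List.count_pos_iff] at hd
  omega

theorem pv_len_pos_iff (l : List Char) (h : ∀ c, c ∉ pvA4 → l.count c = 0) :
    (0 < l.length ↔ 0 < l.count '^' ∨ 0 < l.count 'v' ∨ 0 < l.count '<' ∨ 0 < l.count '>') := by
  constructor
  · intro hl
    obtain ⟨d, hd⟩ := List.exists_mem_of_length_pos hl
    have hda := pv_cells_arrow_of_counts l h d hd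
    rw [← List.count_pos_iff] at hd
    simp only [pvA4, List.mem_cons, List.not_mem_nil, or_false] at hda
    rcases hda with rfl | rfl | rfl | rfl <;> tauto
  · intro hc
    have : ∃ d, d ∈ l := by
      rcases hc with hc | hc | hc | hc
      exacts [⟨'^', List.count_pos_iff.1 hc⟩, ⟨'v', List.count_pos_iff.1 hc⟩,
        ⟨'<', List.count_pos_iff.1 hc⟩, ⟨'>', List.count_pos_iff.1 hc⟩]
    obtain ⟨d, hd⟩ := this
    exact List.length_pos_of_mem hd

-- --- update lemmas ---

theorem pvUpd_length (g : List (List (List Char))) (a b : Nat) (c : Char) :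
    (pvUpd g a b c).length = g.length := by
  simp [pvUpd]

theorem pvUpd_rowlen (g : List (List (List Char))) (a b : Nat) (c : Char) (k : Nat) :
    ((pvUpd g a b c).getD k []).length = ((g.getD k []).length) := by
  unfold pvUpd
  rw [pv_getD_set]
  split_ifs with hk
  · obtain ⟨rfl, _⟩ := hk
    simp
  · rfl

theorem pvCell_upd (g : List (List (List Char))) (a b p q : Nat) (c : Char)
    (hA : a < g.length) (hB : b < (g.getD a []).length) :
    pvCell (pvUpd g a b c) p q =
      if a = p ∧ b = q then pvCell g p q ++ [c] else pvCell g p q := by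
  unfold pvCell pvUpd
  rw [pv_getD_set]
  by_cases hap : a = p
  · subst hap
    simp only [hA, and_true, if_true, true_and]
    rw [pv_getD_set]
    by_cases hbq : b = q
    · subst hbq
      have hB' : b < (g[a]?.getD []).length := by simpa [List.getD] using hB
      simp [hB', pvCell, List.getD]
    · simp [hbq, pvCell]
  · simp [hap]

theorem pvCell_upd_count (g : List (List (List Char))) (a b p q : Nat) (c z : Char)
    (hA : a < g.length) (hB : b < (g.getD a []).length) :
    (pvCell (pvUpd g a b c) p q).count z =
      (pvCell g p q).count z + (if a = p ∧ b = q ∧ c = z then 1 else 0) := by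
  rw [pvCell_upd g a b p q c hA hB]
  by_cases hab : a = p ∧ b = q
  · rcases hab with ⟨rfl, rfl⟩
    by_cases hcz : c = z <;> simp [hcz, List.count_append]
  · simp only [if_neg hab]
    have : ¬ (a = p ∧ b = q ∧ c = z) := fun ⟨h1, h2, _⟩ => hab ⟨h1, h2⟩
    simp [this]

-- --- wrap lemmas ---

theorem pv_wrap_bounds (W : Int) (hW : 1 ≤ W) (x : Int) :
    1 ≤ pvWrap W x ∧ (pvWrap W x : Int) ≤ W := by
  unfold pvWrap
  rw [PySem.Int.mod_eq_emod_of_pos (by omega)]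
  have h1 : 0 ≤ (x - 1) % W := Int.emod_nonneg _ (by omega)
  have h2 : (x - 1) % W < W := Int.emod_lt_of_pos _ (by omega)
  omega

theorem pv_wrap_id (W : Int) (hW : 1 ≤ W) (x : Nat) (h1 : 1 ≤ x) (h2 : (x : Int) ≤ W) :
    pvWrap W (x : Int) = x := by
  unfold pvWrap
  rw [PySem.Int.mod_eq_emod_of_pos (by omega)]
  rw [Int.emod_eq_of_lt (by omega) (by omega)]
  omega

theorem pv_wrap_shift (W : Int) (hW : 1 ≤ W) (x y : Int) :
    pvWrap W ((pvWrap W x : Int) + y) = pvWrap W (x + y) := by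
  unfold pvWrap
  rw [PySem.Int.mod_eq_emod_of_pos (by omega), PySem.Int.mod_eq_emod_of_pos (by omega),
    PySem.Int.mod_eq_emod_of_pos (by omega)]
  have h1 : 0 ≤ (x - 1) % W := Int.emod_nonneg _ (by omega)
  have ht : (((1 + (x - 1) % W).toNat : Int)) = 1 + (x - 1) % W := Int.toNat_of_nonneg (by omega)
  rw [ht]
  have harg : 1 + (x - 1) % W + y - 1 = (x - 1) % W + y := by ring
  rw [harg]
  have : ((x - 1) % W + y) % W = (x - 1 + y) % W := by
    conv_rhs => rw [Int.add_emod]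
    rw [Int.add_emod, Int.emod_emod_of_dvd _ dvd_rfl]
  rw [this, show x + y - 1 = x - 1 + y by ring]

theorem pv_wrap_succ (n q : Nat) (hn : 3 ≤ n) (h1 : 1 ≤ q) (h2 : q ≤ n - 2) :
    pvWrap ((n : Int) - 2) ((q : Int) + 1) = if q < n - 2 then q + 1 else 1 := by
  unfold pvWrap
  rw [PySem.Int.mod_eq_emod_of_pos (by omega)]
  rw [show (q : Int) + 1 - 1 = (q : Int) by ring]
  by_cases h : q < n - 2
  · rw [Int.emod_eq_of_lt (by omega) (by omega)]
    simp [h]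
    omega
  · have hq : (q : Int) = (n : Int) - 2 := by omega
    rw [hq, Int.emod_self]
    simp [h]

theorem pv_wrap_pred (n q : Nat) (hn : 3 ≤ n) (h1 : 1 ≤ q) (h2 : q ≤ n - 2) :
    pvWrap ((n : Int) - 2) ((q : Int) - 1) = if 1 < q then q - 1 else n - 2 := by
  unfold pvWrap
  rw [PySem.Int.mod_eq_emod_of_pos (by omega)]
  by_cases h : 1 < q
  · rw [Int.emod_eq_of_lt (by omega) (by omega)]
    simp [h]
  · have hq : (q : Int) = 1 := by omega
    rw [hq]
    rw [show (1 : Int) - 1 - 1 = ((n : Int) - 2 - 1) + ((n : Int) - 2) * (-1) by ring]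
    rw [Int.add_mul_emod_self_left]
    rw [Int.emod_eq_of_lt (by omega) (by omega)]
    simp [h]
    omega

-- --- event-fold machinery ---

theorem pvStepE_eq_upd (m n : Nat) (acc : List (List (List Char))) (e : Nat × Nat × Char)
    (h : e.2.2 ∈ pvA4) :
    pvStepE m n acc e = pvUpd acc (pvTgt m n e).1 (pvTgt m n e).2 e.2.2 := by
  obtain ⟨i, j, d⟩ := e
  simp only [pvA4, List.mem_cons, List.not_mem_nil, or_false] at h
  rcases h with rfl | rfl | rfl | rfl <;> rfl

theorem pv_foldl_count (m n : Nat) (hm : 3 ≤ m) (hn : 3 ≤ n) :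
    ∀ (E : List (Nat × Nat × Char)) (acc : List (List (List Char))),
      (∀ e ∈ E, e.2.2 ∈ pvA4 ∧ 1 ≤ (pvTgt m n e).1 ∧ (pvTgt m n e).1 ≤ m - 2 ∧
          1 ≤ (pvTgt m n e).2 ∧ (pvTgt m n e).2 ≤ n - 2) →
      acc.length = m → (∀ k, k < m → ((acc.getD k []).length = n)) →
      ((E.foldl (pvStepE m n) acc).length = m ∧
       (∀ k, k < m → (((E.foldl (pvStepE m n) acc).getD k []).length = n)) ∧
       ∀ p q c, p < m → q < n →
         (pvCell (E.foldl (pvStepE m n) acc) p q).count c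
           = (pvCell acc p q).count c
             + E.countP (fun e => decide (pvTgt m n e = (p, q)) && decide (e.2.2 = c))) := by
  intro E
  induction E with
  | nil => intro acc _ h1 h2; exact ⟨h1, h2, fun p q c _ _ => by simp⟩
  | cons e E ih =>
    intro acc hE hlen hrow
    have he := hE e (List.mem_cons_self ..)
    have hstep : pvStepE m n acc e = pvUpd acc (pvTgt m n e).1 (pvTgt m n e).2 e.2.2 :=
      pvStepE_eq_upd m n acc e he.1
    have hA : (pvTgt m n e).1 < acc.length := by omega
    have hB : (pvTgt m n e).2 < (acc.getD (pvTgt m n e).1 []).length := by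
      rw [hrow _ (by omega)]; omega
    have hlen' : (pvStepE m n acc e).length = m := by
      rw [hstep, pvUpd_length, hlen]
    have hrow' : ∀ k, k < m → (((pvStepE m n acc e).getD k []).length = n) := by
      intro k hk
      rw [hstep, pvUpd_rowlen]
      exact hrow k hk
    obtain ⟨r1, r2, r3⟩ := ih (pvStepE m n acc e)
      (fun e' he' => hE e' (List.mem_cons_of_mem _ he')) hlen' hrow'
    refine ⟨by simpa using r1, by simpa using r2, ?_⟩
    intro p q c hp hq
    rw [List.foldl_cons, r3 p q c hp hq, List.countP_cons]
    rw [hstep, pvCell_upd_count acc _ _ p q _ c hA hB]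
    have : (pvTgt m n e).1 = p ∧ (pvTgt m n e).2 = q ∧ e.2.2 = c ↔
        (pvTgt m n e = (p, q)) ∧ e.2.2 = c := by
      constructor
      · rintro ⟨h1, h2, h3⟩; exact ⟨Prod.ext h1 h2, h3⟩
      · rintro ⟨h1, h2⟩; exact ⟨congrArg Prod.fst h1, congrArg Prod.snd h1, h2⟩
    by_cases hcase : (pvTgt m n e = (p, q)) ∧ e.2.2 = c
    · rw [if_pos (this.2 hcase)]
      simp [hcase.1, hcase.2]
      try omega
    · rw [if_neg (fun hx => hcase (this.1 hx))]
      have : ¬ ((decide (pvTgt m n e = (p, q)) && decide (e.2.2 = c)) = true) := by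
        simpa using hcase
      simp [this]
      try omega

theorem pv_adv_flatten (g : List (List (List Char))) :
    advance_grid g =
      (pvE g g.length ((g.headD []).length)).foldl (pvStepE g.length ((g.headD []).length))
        (List.replicate g.length (List.replicate ((g.headD []).length) [])) := by
  unfold advance_grid pvE
  rw [List.foldl_flatMap]
  refine List.foldl_ext _ _ _ (fun acc i _ => ?_)
  rw [List.foldl_flatMap]
  refine List.foldl_ext _ _ _ (fun acc' j _ => ?_)
  rw [List.foldl_map]
  rfl

theorem pvE_events (g : List (List (List Char))) (m n : Nat) (hm : 3 ≤ m) (hn : 3 ≤ n)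
    (hcells : ∀ i j, 1 ≤ i → i ≤ m - 2 → 1 ≤ j → j ≤ n - 2 → ∀ d ∈ pvCell g i j, d ∈ pvA4) :
    ∀ e ∈ pvE g m n, e.2.2 ∈ pvA4 ∧ 1 ≤ (pvTgt m n e).1 ∧ (pvTgt m n e).1 ≤ m - 2 ∧
      1 ≤ (pvTgt m n e).2 ∧ (pvTgt m n e).2 ≤ n - 2 := by
  intro e he
  simp only [pvE, List.mem_flatMap, List.mem_map, List.mem_range'_1] at he
  obtain ⟨i, hi, j, hj, d, hd, rfl⟩ := he
  have hi1 : 1 ≤ i := hi.1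
  have hi2 : i ≤ m - 2 := by omega
  have hj1 : 1 ≤ j := hj.1
  have hj2 : j ≤ n - 2 := by omega
  have hda : d ∈ pvA4 := hcells i j hi1 hi2 hj1 hj2 d hd
  refine ⟨hda, ?_⟩
  simp only [pvA4, List.mem_cons, List.not_mem_nil, or_false] at hda
  rcases hda with rfl | rfl | rfl | rfl <;>
    simp only [pvTgt] <;> split_ifs <;> omega

theorem pv_countP_E (g : List (List (List Char))) (m n : Nat) (hm : 3 ≤ m) (hn : 3 ≤ n)
    (p q : Nat) (c : Char) (sp sq : Nat)
    (hsp : 1 ≤ sp ∧ sp ≤ m - 2) (hsq : 1 ≤ sq ∧ sq ≤ n - 2)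
    (hsrc : ∀ i j d, 1 ≤ i → i ≤ m - 2 → 1 ≤ j → j ≤ n - 2 →
      ((pvTgt m n (i, j, d) = (p, q) ∧ d = c) ↔ (i = sp ∧ j = sq ∧ d = c))) :
    (pvE g m n).countP (fun e => decide (pvTgt m n e = (p, q)) && decide (e.2.2 = c))
      = (pvCell g sp sq).count c := by
  unfold pvE
  rw [pv_countP_flatMap]
  have hnd : (List.range' 1 (m - 2)).Nodup := (List.pairwise_lt_range' ..).nodup
  refine pv_sum_map_ite _ hnd sp (by rw [List.mem_range'_1]; omega) _ _ ?_
  intro i hi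
  rw [List.mem_range'_1] at hi
  rw [pv_countP_flatMap]
  have hnd' : (List.range' 1 (n - 2)).Nodup := (List.pairwise_lt_range' ..).nodup
  by_cases hip : i = sp
  · subst hip
    rw [if_pos rfl]
    refine pv_sum_map_ite _ hnd' sq (by rw [List.mem_range'_1]; omega) _ _ ?_
    intro j hj
    rw [List.mem_range'_1] at hj
    rw [List.countP_map]
    by_cases hjq : j = sq
    · subst hjq
      rw [if_pos rfl, List.count_eq_countP]
      refine List.countP_congr ?_
      intro d _
      simp only [Function.comp_apply, Bool.and_eq_true, decide_eq_true_eq, beq_iff_eq]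
      have := hsrc i j d hi.1 (by omega) hj.1 (by omega)
      constructor
      · intro ⟨h1, h2⟩; exact (this.1 ⟨h1, h2⟩).2.2
      · intro h1; exact (this.2 ⟨rfl, rfl, h1⟩).imp id (fun h => h)
    · rw [if_neg hjq]
      rw [List.countP_eq_zero]
      intro d _
      simp only [Function.comp_apply, Bool.and_eq_true, decide_eq_true_eq, not_and]
      intro h1 h2
      exact hjq ((hsrc i j d hi.1 (by omega) hj.1 (by omega)).1 ⟨h1, h2⟩).2.1
  · rw [if_neg hip]
    rw [List.sum_eq_zero]
    intro y hy
    rcases List.mem_map.1 hy with ⟨j, hj, rfl⟩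
    rw [List.mem_range'_1] at hj
    rw [List.countP_map, List.countP_eq_zero]
    intro d _
    simp only [Function.comp_apply, Bool.and_eq_true, decide_eq_true_eq, not_and]
    intro h1 h2
    exact hip ((hsrc i j d hi.1 (by omega) hj.1 (by omega)).1 ⟨h1, h2⟩).1

theorem pv_countP_E_zero (g : List (List (List Char))) (m n : Nat) (p q : Nat) (c : Char)
    (h : ∀ e ∈ pvE g m n, ¬ (pvTgt m n e = (p, q) ∧ e.2.2 = c)) :
    (pvE g m n).countP (fun e => decide (pvTgt m n e = (p, q)) && decide (e.2.2 = c)) = 0 := by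
  rw [List.countP_eq_zero]
  intro e he
  simp only [Bool.and_eq_true, decide_eq_true_eq, not_and]
  intro h1 h2
  exact h e he ⟨h1, h2⟩

-- --- one advance step, characterised ---

theorem pv_adv_spec (g : List (List (List Char))) (m n : Nat) (hm : 3 ≤ m) (hn : 3 ≤ n)
    (hL : g.length = m) (hH : ((g.headD []).length = n))
    (hrow : ∀ k, k < m → ((g.getD k []).length = n))
    (hcells : ∀ i j, 1 ≤ i → i ≤ m - 2 → 1 ≤ j → j ≤ n - 2 → ∀ d ∈ pvCell g i j, d ∈ pvA4) :
    (advance_grid g).length = m ∧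
    (∀ k, k < m → (((advance_grid g).getD k []).length = n)) ∧
    (∀ p q, p < m → q < n → ¬ (1 ≤ p ∧ p ≤ m - 2 ∧ 1 ≤ q ∧ q ≤ n - 2) →
        pvCell (advance_grid g) p q = []) ∧
    (∀ p q, 1 ≤ p → p ≤ m - 2 → 1 ≤ q → q ≤ n - 2 →
       ((pvCell (advance_grid g) p q).count '<'
           = (pvCell g p (pvWrap ((n : Int) - 2) ((q : Int) + 1))).count '<' ∧
        (pvCell (advance_grid g) p q).count '>'
           = (pvCell g p (pvWrap ((n : Int) - 2) ((q : Int) - 1))).count '>' ∧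
        (pvCell (advance_grid g) p q).count '^'
           = (pvCell g (pvWrap ((m : Int) - 2) ((p : Int) + 1)) q).count '^' ∧
        (pvCell (advance_grid g) p q).count 'v'
           = (pvCell g (pvWrap ((m : Int) - 2) ((p : Int) - 1)) q).count 'v' ∧
        ∀ c, c ∉ pvA4 → (pvCell (advance_grid g) p q).count c = 0)) := by
  have hflat := pv_adv_flatten g
  rw [hL, hH] at hflat
  have hT := pvE_events g m n hm hn hcells
  have hrep_len : (List.replicate m (List.replicate n ([] : List Char))).length = m := by simp
  have hrep_row : ∀ k, k < m →
      (((List.replicate m (List.replicate n ([] : List Char))).getD k []).length = n) := by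
    intro k hk
    simp [List.getD_eq_getElem?_getD, hk]
  obtain ⟨r1, r2, r3⟩ := pv_foldl_count m n hm hn (pvE g m n) _ hT hrep_len hrep_row
  have hcell0 : ∀ p q, p < m → q < n →
      pvCell (List.replicate m (List.replicate n ([] : List Char))) p q = [] := by
    intro p q hp hq
    simp [pvCell, List.getD_eq_getElem?_getD, hp, hq]
  rw [hflat]
  refine ⟨r1, r2, ?_, ?_⟩
  · intro p q hp hq hni
    refine pv_eq_nil_of_count _ (fun c => ?_)
    rw [r3 p q c hp hq, hcell0 p q hp hq]
    simp only [List.count_nil, Nat.zero_add]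
    refine pv_countP_E_zero g m n p q c (fun e he => ?_)
    rintro ⟨htgt, rfl⟩
    obtain ⟨_, b1, b2, b3, b4⟩ := hT _ he
    rw [htgt] at b1 b2 b3 b4
    exact hni ⟨b1, b2, b3, b4⟩
  · intro p q hp1 hp2 hq1 hq2
    have hpm : p < m := by omega
    have hqn : q < n := by omega
    have hwq1 := pv_wrap_succ n q hn hq1 hq2
    have hwq2 := pv_wrap_pred n q hn hq1 hq2
    have hwp1 := pv_wrap_succ m p hm hp1 hp2
    have hwp2 := pv_wrap_pred m p hm hp1 hp2
    refine ⟨?_, ?_, ?_, ?_, ?_⟩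
    · rw [r3 _ _ _ hpm hqn, hcell0 p q hpm hqn]
      simp only [List.count_nil, Nat.zero_add]
      refine pv_countP_E g m n hm hn p q '<' p (pvWrap ((n : Int) - 2) ((q : Int) + 1))
        ⟨hp1, hp2⟩ (by rw [hwq1]; constructor <;> (split_ifs <;> omega)) ?_
      intro i j d hi1 hi2 hj1 hj2
      rw [hwq1]
      constructor
      · rintro ⟨ht, rfl⟩
        have ht' : (i, if 1 < j then j - 1 else n - 2) = (p, q) := ht
        have h1 : i = p := congrArg Prod.fst ht'
        have h2 : (if 1 < j then j - 1 else n - 2) = q := congrArg Prod.snd ht'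
        refine ⟨h1, ?_, rfl⟩
        split_ifs at h2 ⊢ <;> omega
      · rintro ⟨h1, h2, h3⟩
        subst h3
        refine ⟨?_, rfl⟩
        have hred : pvTgt m n (i, j, '<') = (i, if 1 < j then j - 1 else n - 2) := rfl
        rw [hred]
        simp only [Prod.mk.injEq]
        refine ⟨h1, ?_⟩
        split_ifs at h2 ⊢ <;> omega
    · rw [r3 _ _ _ hpm hqn, hcell0 p q hpm hqn]
      simp only [List.count_nil, Nat.zero_add]
      refine pv_countP_E g m n hm hn p q '>' p (pvWrap ((n : Int) - 2) ((q : Int) - 1))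
        ⟨hp1, hp2⟩ (by rw [hwq2]; constructor <;> (split_ifs <;> omega)) ?_
      intro i j d hi1 hi2 hj1 hj2
      rw [hwq2]
      constructor
      · rintro ⟨ht, rfl⟩
        have ht' : (i, if j < n - 2 then j + 1 else 1) = (p, q) := ht
        have h1 : i = p := congrArg Prod.fst ht'
        have h2 : (if j < n - 2 then j + 1 else 1) = q := congrArg Prod.snd ht'
        refine ⟨h1, ?_, rfl⟩
        split_ifs at h2 ⊢ <;> omega
      · rintro ⟨h1, h2, h3⟩
        subst h3
        refine ⟨?_, rfl⟩
        have hred : pvTgt m n (i, j, '>') = (i, if j < n - 2 then j + 1 else 1) := rfl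
        rw [hred]
        simp only [Prod.mk.injEq]
        refine ⟨h1, ?_⟩
        split_ifs at h2 ⊢ <;> omega
    · rw [r3 _ _ _ hpm hqn, hcell0 p q hpm hqn]
      simp only [List.count_nil, Nat.zero_add]
      refine pv_countP_E g m n hm hn p q '^' (pvWrap ((m : Int) - 2) ((p : Int) + 1)) q
        (by rw [hwp1]; constructor <;> (split_ifs <;> omega)) ⟨hq1, hq2⟩ ?_
      intro i j d hi1 hi2 hj1 hj2
      rw [hwp1]
      constructor
      · rintro ⟨ht, rfl⟩
        have ht' : (if 1 < i then i - 1 else m - 2, j) = (p, q) := ht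
        have h1 : (if 1 < i then i - 1 else m - 2) = p := congrArg Prod.fst ht'
        have h2 : j = q := congrArg Prod.snd ht'
        refine ⟨?_, h2, rfl⟩
        split_ifs at h1 ⊢ <;> omega
      · rintro ⟨h1, h2, h3⟩
        subst h3
        refine ⟨?_, rfl⟩
        have hred : pvTgt m n (i, j, '^') = (if 1 < i then i - 1 else m - 2, j) := rfl
        rw [hred]
        simp only [Prod.mk.injEq]
        refine ⟨?_, h2⟩
        split_ifs at h1 ⊢ <;> omega
    · rw [r3 _ _ _ hpm hqn, hcell0 p q hpm hqn]
      simp only [List.count_nil, Nat.zero_add]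
      refine pv_countP_E g m n hm hn p q 'v' (pvWrap ((m : Int) - 2) ((p : Int) - 1)) q
        (by rw [hwp2]; constructor <;> (split_ifs <;> omega)) ⟨hq1, hq2⟩ ?_
      intro i j d hi1 hi2 hj1 hj2
      rw [hwp2]
      constructor
      · rintro ⟨ht, rfl⟩
        have ht' : (if i < m - 2 then i + 1 else 1, j) = (p, q) := ht
        have h1 : (if i < m - 2 then i + 1 else 1) = p := congrArg Prod.fst ht'
        have h2 : j = q := congrArg Prod.snd ht'
        refine ⟨?_, h2, rfl⟩
        split_ifs at h1 ⊢ <;> omega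
      · rintro ⟨h1, h2, h3⟩
        subst h3
        refine ⟨?_, rfl⟩
        have hred : pvTgt m n (i, j, 'v') = (if i < m - 2 then i + 1 else 1, j) := rfl
        rw [hred]
        simp only [Prod.mk.injEq]
        refine ⟨?_, h2⟩
        split_ifs at h1 ⊢ <;> omega
    · intro c hc
      rw [r3 _ _ _ hpm hqn, hcell0 p q hpm hqn]
      simp only [List.count_nil, Nat.zero_add]
      rw [List.countP_eq_zero]
      intro e he
      have harrow := (hT e he).1
      simp only [Bool.and_eq_true, decide_eq_true_eq, not_and]
      intro _ hec
      exact hc (hec ▸ harrow)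

-- --- the iterated grid and its invariant ---

def pvG0 (grid : List String) : List (List (List Char)) :=
  (List.range grid.length).map fun i => (List.range ((grid.headD "").length)).map fun j =>
    if pvChar grid i j = '.' then ([] : List Char) else [pvChar grid i j]

theorem pvEc_nonarrow (grid : List String) (m n t i j : Nat) (c : Char) (hc : c ∉ pvA4) :
    pvEc grid m n t i j c = 0 := by
  simp only [pvA4, List.mem_cons, List.not_mem_nil, or_false, not_or] at hc
  obtain ⟨h1, h2, h3, h4⟩ := hc
  simp [pvEc, h1, h2, h3, h4]

theorem pv_count_init (ch c : Char) (hch : ch ∈ (['.', '^', 'v', '<', '>'] : List Char)) :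
    (if ch = '.' then ([] : List Char) else [ch]).count c =
      if c = '<' then (if ch = '<' then 1 else 0)
      else if c = '>' then (if ch = '>' then 1 else 0)
      else if c = '^' then (if ch = '^' then 1 else 0)
      else if c = 'v' then (if ch = 'v' then 1 else 0)
      else 0 := by
  simp only [List.mem_cons, List.not_mem_nil, or_false] at hch
  rcases hch with rfl | rfl | rfl | rfl | rfl <;>
    · split_ifs <;> simp_all [List.count_cons] <;>
        (intro h; exact absurd h.symm (by assumption))

theorem pv_g0_len (grid : List String) : (pvG0 grid).length = grid.length := by
  simp [pvG0]

theorem pv_g0_row (grid : List String) (m n : Nat) (hMm : grid.length = m)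
    (hNn : ((grid.headD "").length = n)) (k : Nat) (hk : k < m) :
    (((pvG0 grid).getD k []).length = n) := by
  unfold pvG0
  rw [hMm, hNn, pv_getD_map_range _ _ _ hk]
  simp

theorem pv_cell_g0 (grid : List String) (m n : Nat) (hMm : grid.length = m)
    (hNn : ((grid.headD "").length = n)) (i j : Nat) (hi : i < m) (hj : j < n) :
    pvCell (pvG0 grid) i j = if pvChar grid i j = '.' then [] else [pvChar grid i j] := by
  unfold pvCell pvG0
  rw [hMm, hNn, pv_getD_map_range _ _ _ hi, pv_getD_map_range _ _ _ hj]

theorem pv_inv (grid : List String) (m n : Nat) (hm : 3 ≤ m) (hn : 3 ≤ n)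
    (hMm : grid.length = m) (hNn : ((grid.headD "").length = n))
    (hvalid : ∀ i j, 1 ≤ i → i ≤ m - 2 → 1 ≤ j → j ≤ n - 2 →
        pvChar grid i j ∈ (['.', '^', 'v', '<', '>'] : List Char)) :
    ∀ t : Nat,
      ((advance_grid^[t] (pvG0 grid)).length = m ∧
       (∀ k, k < m → (((advance_grid^[t] (pvG0 grid)).getD k []).length = n)) ∧
       (1 ≤ t → ∀ p q, p < m → q < n → ¬ (1 ≤ p ∧ p ≤ m - 2 ∧ 1 ≤ q ∧ q ≤ n - 2) →
          pvCell (advance_grid^[t] (pvG0 grid)) p q = []) ∧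
       (∀ p q c, 1 ≤ p → p ≤ m - 2 → 1 ≤ q → q ≤ n - 2 →
          (pvCell (advance_grid^[t] (pvG0 grid)) p q).count c = pvEc grid m n t p q c)) := by
  have hW : (1 : Int) ≤ (n : Int) - 2 := by omega
  have hHt : (1 : Int) ≤ (m : Int) - 2 := by omega
  intro t
  induction t with
  | zero =>
    refine ⟨by rw [Function.iterate_zero_apply, pv_g0_len, hMm],
      fun k hk => by rw [Function.iterate_zero_apply]; exact pv_g0_row grid m n hMm hNn k hk,
      fun h => absurd h (by omega), ?_⟩
    intro p q c hp1 hp2 hq1 hq2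
    rw [Function.iterate_zero_apply,
      pv_cell_g0 grid m n hMm hNn p q (by omega) (by omega)]
    have hwq1 : pvWrap ((n : Int) - 2) ((q : Int) + ((0 : Nat) : Int)) = q := by
      rw [show ((q : Int) + ((0 : Nat) : Int)) = ((q : Int)) by push_cast; ring]
      exact pv_wrap_id _ hW q hq1 (by omega)
    have hwq2 : pvWrap ((n : Int) - 2) ((q : Int) - ((0 : Nat) : Int)) = q := by
      rw [show ((q : Int) - ((0 : Nat) : Int)) = ((q : Int)) by push_cast; ring]
      exact pv_wrap_id _ hW q hq1 (by omega)
    have hwp1 : pvWrap ((m : Int) - 2) ((p : Int) + ((0 : Nat) : Int)) = p := by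
      rw [show ((p : Int) + ((0 : Nat) : Int)) = ((p : Int)) by push_cast; ring]
      exact pv_wrap_id _ hHt p hp1 (by omega)
    have hwp2 : pvWrap ((m : Int) - 2) ((p : Int) - ((0 : Nat) : Int)) = p := by
      rw [show ((p : Int) - ((0 : Nat) : Int)) = ((p : Int)) by push_cast; ring]
      exact pv_wrap_id _ hHt p hp1 (by omega)
    unfold pvEc
    rw [hwq1, hwq2, hwp1, hwp2]
    exact pv_count_init (pvChar grid p q) c (hvalid p q hp1 hp2 hq1 hq2)
  | succ t ih =>
    obtain ⟨s1, s2, s3, s4⟩ := ih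
    have hHd : (((advance_grid^[t] (pvG0 grid)).headD []).length = n) := by
      rw [pv_headD_eq_getD]; exact s2 0 (by omega)
    have hcellsArr : ∀ i j, 1 ≤ i → i ≤ m - 2 → 1 ≤ j → j ≤ n - 2 →
        ∀ d ∈ pvCell (advance_grid^[t] (pvG0 grid)) i j, d ∈ pvA4 := by
      intro i j hi1 hi2 hj1 hj2
      refine pv_cells_arrow_of_counts _ (fun c hc => ?_)
      rw [s4 i j c hi1 hi2 hj1 hj2]
      exact pvEc_nonarrow grid m n t i j c hc
    obtain ⟨a1, a2, a3, a4⟩ :=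
      pv_adv_spec (advance_grid^[t] (pvG0 grid)) m n hm hn s1 hHd s2 hcellsArr
    rw [Function.iterate_succ_apply']
    refine ⟨a1, a2, fun _ => a3, ?_⟩
    intro p q c hp1 hp2 hq1 hq2
    obtain ⟨c1, c2, c3, c4, c5⟩ := a4 p q hp1 hp2 hq1 hq2
    have hbq1 := pv_wrap_bounds ((n : Int) - 2) hW ((q : Int) + 1)
    have hbq2 := pv_wrap_bounds ((n : Int) - 2) hW ((q : Int) - 1)
    have hbp1 := pv_wrap_bounds ((m : Int) - 2) hHt ((p : Int) + 1)
    have hbp2 := pv_wrap_bounds ((m : Int) - 2) hHt ((p : Int) - 1)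
    by_cases hc1 : c = '<'
    · subst hc1
      rw [c1, s4 p (pvWrap ((n : Int) - 2) ((q : Int) + 1)) '<' hp1 hp2 hbq1.1 (by omega)]
      unfold pvEc
      simp only [reduceIte]
      rw [pv_wrap_shift _ hW,
        show ((q : Int) + 1 + (t : Int)) = ((q : Int) + ((t + 1 : Nat) : Int)) by push_cast; ring]
    by_cases hc2 : c = '>'
    · subst hc2
      rw [c2, s4 p (pvWrap ((n : Int) - 2) ((q : Int) - 1)) '>' hp1 hp2 hbq2.1 (by omega)]
      unfold pvEc
      simp only [show ((('>' : Char) = '<')) = False by simp, if_false, reduceIte]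
      rw [show ((pvWrap ((n : Int) - 2) ((q : Int) - 1) : Int) - (t : Int))
            = ((pvWrap ((n : Int) - 2) ((q : Int) - 1) : Int) + (-(t : Int))) by ring,
        pv_wrap_shift _ hW,
        show ((q : Int) - 1 + (-(t : Int))) = ((q : Int) - ((t + 1 : Nat) : Int)) by push_cast; ring]
    by_cases hc3 : c = '^'
    · subst hc3
      rw [c3, s4 (pvWrap ((m : Int) - 2) ((p : Int) + 1)) q '^' hbp1.1 (by omega) hq1 hq2]
      unfold pvEc
      simp only [show ((('^' : Char) = '<')) = False by simp,
        show ((('^' : Char) = '>')) = False by simp, if_false, reduceIte]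
      rw [pv_wrap_shift _ hHt,
        show ((p : Int) + 1 + (t : Int)) = ((p : Int) + ((t + 1 : Nat) : Int)) by push_cast; ring]
    by_cases hc4 : c = 'v'
    · subst hc4
      rw [c4, s4 (pvWrap ((m : Int) - 2) ((p : Int) - 1)) q 'v' hbp2.1 (by omega) hq1 hq2]
      unfold pvEc
      simp only [show ((('v' : Char) = '<')) = False by simp,
        show ((('v' : Char) = '>')) = False by simp,
        show ((('v' : Char) = '^')) = False by simp, if_false, reduceIte]
      rw [show ((pvWrap ((m : Int) - 2) ((p : Int) - 1) : Int) - (t : Int))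
            = ((pvWrap ((m : Int) - 2) ((p : Int) - 1) : Int) + (-(t : Int))) by ring,
        pv_wrap_shift _ hHt,
        show ((p : Int) - 1 + (-(t : Int))) = ((p : Int) - ((t + 1 : Nat) : Int)) by push_cast; ring]
    · have hcna : c ∉ pvA4 := by
        simp only [pvA4, List.mem_cons, List.not_mem_nil, or_false]
        tauto
      rw [c5 c hcna, pvEc_nonarrow grid m n (t + 1) p q c hcna]


-- --- degenerate grids ---

theorem pv_adv_degenerate (g : List (List (List Char))) (m n : Nat) (hm1 : 1 ≤ m)
    (h : m ≤ 2 ∨ n ≤ 2) (hL : g.length = m) (hH : ((g.headD []).length = n)) :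
    advance_grid g = List.replicate m (List.replicate n []) := by
  simp only [advance_grid]
  rw [hL, hH]
  rcases h with h | h
  · rw [show m - 2 = 0 by omega]
    simp
  · rw [show n - 2 = 0 by omega]
    simp [List.foldl_fixed]

theorem pv_iter_degenerate (grid : List String) (m n : Nat) (hm1 : 1 ≤ m)
    (h : m ≤ 2 ∨ n ≤ 2) (hMm : grid.length = m) (hNn : ((grid.headD "").length = n)) :
    ∀ t : Nat, 1 ≤ t →
      advance_grid^[t] (pvG0 grid) = List.replicate m (List.replicate n []) := by
  intro t ht
  induction t with
  | zero => omega
  | succ t ih =>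
    rw [Function.iterate_succ_apply']
    by_cases h1t : 1 ≤ t
    · rw [ih h1t]
      refine pv_adv_degenerate _ m n hm1 h (by simp) ?_
      have hrep : (List.replicate m (List.replicate n ([] : List Char))).headD []
          = List.replicate n [] := by
        cases m with
        | zero => omega
        | succ m' => simp [List.replicate_succ]
      rw [hrep]
      simp
    · have ht0 : t = 0 := by omega
      subst ht0
      rw [Function.iterate_zero_apply]
      refine pv_adv_degenerate _ m n hm1 h (by rw [pv_g0_len, hMm]) ?_
      rw [pv_headD_eq_getD]
      exact pv_g0_row grid m n hMm hNn 0 (by omega)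

-- --- assembling the result lists ---

theorem pv_foldl_frames (m n : Nat) (g0 : List (List (List Char))) :
    ∀ (k : Nat) (hb : List (List (List Bool))),
      ((List.range k).foldl
          (fun (st : List (List (List Char)) × List (List (List Bool))) _ =>
            let g' := advance_grid st.1
            (g', st.2 ++ [pvFrame m n g'])) (g0, hb))
        = (advance_grid^[k] g0,
           hb ++ (List.range' 1 k).map fun t => pvFrame m n (advance_grid^[t] g0)) := by
  intro k
  induction k with
  | zero => intro hb; simp
  | succ k ih =>
    intro hb
    rw [List.range_succ, List.foldl_append, ih hb]
    simp only [List.foldl_cons, List.foldl_nil]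
    have hiter : advance_grid (advance_grid^[k] g0) = advance_grid^[k + 1] g0 :=
      (Function.iterate_succ_apply' _ _ _).symm
    rw [hiter]
    rw [show List.range' 1 (k + 1) = List.range' 1 k ++ [1 + k] by
      simpa using (List.range'_concat (s := 1) (n := k) (step := 1))]
    rw [List.map_append, ← List.append_assoc]
    simp [Nat.add_comm 1 k]


-- ===== VERDICT (by name: the statement is the Claim_ definition above) =====
-- bridge: the A port, written via the named proof-side pieces (definitional)
theorem pv_A_unfold (grid : List String) :
    find_blizzards_till_repeat grid =
      ((List.range (Int.lcm ((grid.length : Int) - 2) (((grid.headD "").length : Int) - 2) - 1)).foldl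
        (fun (st : List (List (List Char)) × List (List (List Bool))) _ =>
          let g' := advance_grid st.1
          (g', st.2 ++ [pvFrame grid.length ((grid.headD "").length) g']))
        (pvG0 grid, [pvFrame grid.length ((grid.headD "").length) (pvG0 grid)])).2 := rfl

theorem pv_pos_ite_iff (P : Prop) [Decidable P] : (0 < if P then 1 else 0) ↔ P := by
  split_ifs with h <;> simp [h]

theorem find_blizzards_till_repeat_spec : Claim_equal_find_blizzards_till_repeat := by
  intro grid _ hPre
  obtain ⟨hne, hrows, hvalid⟩ := hPre
  unfold Spec_find_blizzards_till_repeat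
  have hm1 : 1 ≤ grid.length := List.length_pos_of_ne_nil hne
  rw [pv_A_unfold grid,
    pv_foldl_frames (grid.length) ((grid.headD "").length) (pvG0 grid)
      (Int.lcm ((grid.length : Int) - 2) (((grid.headD "").length : Int) - 2) - 1)
      [pvFrame grid.length ((grid.headD "").length) (pvG0 grid)]]
  show [pvFrame grid.length ((grid.headD "").length) (pvG0 grid)] ++ _
      = find_blizzards_till_repeat_alt grid
  unfold find_blizzards_till_repeat_alt
  rw [List.singleton_append]
  refine congrArg₂ List.cons ?_ ?_
  · -- first frame
    unfold pvFrame
    refine List.map_congr_left (fun i hi => ?_)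
    rw [List.mem_range] at hi
    refine List.map_congr_left (fun j hj => ?_)
    rw [List.mem_range] at hj
    rw [pv_cell_g0 grid grid.length ((grid.headD "").length) rfl rfl i j hi hj]
    by_cases h : pvChar grid i j = '.' <;> simp [h]
  · -- later frames
    refine List.map_congr_left (fun t ht => ?_)
    rw [List.mem_range'_1] at ht
    obtain ⟨ht1, ht2⟩ := ht
    have hL2 : 2 ≤ Int.lcm ((grid.length : Int) - 2) (((grid.headD "").length : Int) - 2) := by
      omega
    by_cases hC : 3 ≤ grid.length ∧ 3 ≤ (grid.headD "").length
    · obtain ⟨hm3, hn3⟩ := hC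
      have hv : ∀ i j, 1 ≤ i → i ≤ grid.length - 2 → 1 ≤ j → j ≤ (grid.headD "").length - 2 →
          pvChar grid i j ∈ (['.', '^', 'v', '<', '>'] : List Char) := by
        intro i j hi1 hi2 hj1 hj2
        exact hvalid hL2 i (List.mem_range'_1.2 ⟨hi1, by omega⟩) j (List.mem_range'_1.2 ⟨hj1, by omega⟩)
      obtain ⟨s1, s2, s3, s4⟩ :=
        pv_inv grid grid.length ((grid.headD "").length) hm3 hn3 rfl rfl hv t
      unfold pvFrame
      refine List.map_congr_left (fun i hi => ?_)
      rw [List.mem_range] at hi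
      refine List.map_congr_left (fun j hj => ?_)
      rw [List.mem_range] at hj
      rw [decide_eq_decide]
      by_cases hint : 1 ≤ i ∧ i ≤ grid.length - 2 ∧ 1 ≤ j ∧ j ≤ (grid.headD "").length - 2
      · obtain ⟨hi1, hi2, hj1, hj2⟩ := hint
        have hNA : ∀ c, c ∉ pvA4 →
            (pvCell (advance_grid^[t] (pvG0 grid)) i j).count c = 0 := by
          intro c hc
          rw [s4 i j c hi1 hi2 hj1 hj2]
          exact pvEc_nonarrow grid grid.length ((grid.headD "").length) t i j c hc
        rw [pv_len_pos_iff _ hNA]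
        have e1 : (pvCell (advance_grid^[t] (pvG0 grid)) i j).count '<'
            = (if pvChar grid i (pvWrap (((grid.headD "").length : Int) - 2) ((j : Int) + (t : Int))) = '<' then 1 else 0) := by
          rw [s4 i j '<' hi1 hi2 hj1 hj2]
          unfold pvEc
          simp only [reduceIte]
        have e2 : (pvCell (advance_grid^[t] (pvG0 grid)) i j).count '>'
            = (if pvChar grid i (pvWrap (((grid.headD "").length : Int) - 2) ((j : Int) - (t : Int))) = '>' then 1 else 0) := by
          rw [s4 i j '>' hi1 hi2 hj1 hj2]
          unfold pvEc
          simp only [show ((('>' : Char) = '<')) = False by simp, if_false, reduceIte]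
        have e3 : (pvCell (advance_grid^[t] (pvG0 grid)) i j).count '^'
            = (if pvChar grid (pvWrap ((grid.length : Int) - 2) ((i : Int) + (t : Int))) j = '^' then 1 else 0) := by
          rw [s4 i j '^' hi1 hi2 hj1 hj2]
          unfold pvEc
          simp only [show ((('^' : Char) = '<')) = False by simp,
            show ((('^' : Char) = '>')) = False by simp, if_false, reduceIte]
        have e4 : (pvCell (advance_grid^[t] (pvG0 grid)) i j).count 'v'
            = (if pvChar grid (pvWrap ((grid.length : Int) - 2) ((i : Int) - (t : Int))) j = 'v' then 1 else 0) := by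
          rw [s4 i j 'v' hi1 hi2 hj1 hj2]
          unfold pvEc
          simp only [show ((('v' : Char) = '<')) = False by simp,
            show ((('v' : Char) = '>')) = False by simp,
            show ((('v' : Char) = '^')) = False by simp, if_false, reduceIte]
        rw [e1, e2, e3, e4, pv_pos_ite_iff, pv_pos_ite_iff, pv_pos_ite_iff, pv_pos_ite_iff]
        constructor
        · intro h
          exact ⟨hi1, hi2, hj1, hj2, by tauto⟩
        · intro h
          tauto
      · rw [s3 ht1 i j hi hj hint]
        simp only [List.length_nil]
        constructor
        · intro h
          omega
        · intro h
          exact absurd ⟨h.1, h.2.1, h.2.2.1, h.2.2.2.1⟩ hint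
    · have hdeg : grid.length ≤ 2 ∨ (grid.headD "").length ≤ 2 := by
        rcases Nat.lt_or_ge grid.length 3 with h | h
        · exact Or.inl (by omega)
        · exact Or.inr (by omega)
      rw [pv_iter_degenerate grid grid.length ((grid.headD "").length) hm1 hdeg rfl rfl t ht1]
      unfold pvFrame
      refine List.map_congr_left (fun i hi => ?_)
      rw [List.mem_range] at hi
      refine List.map_congr_left (fun j hj => ?_)
      rw [List.mem_range] at hj
      have hcell : pvCell (List.replicate grid.length
          (List.replicate ((grid.headD "").length) ([] : List Char))) i j = [] := by
        have hj' : j < (grid.head?.getD "").length := by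
          have hhd : grid.headD "" = grid.head?.getD "" := by cases grid <;> rfl
          rwa [hhd] at hj
        simp [pvCell, List.getD_eq_getElem?_getD, hi, hj']
      rw [hcell, decide_eq_decide]
      simp only [List.length_nil]
      constructor
      · intro h
        omega
      · rintro ⟨h1, h2, h3, h4, _⟩
        rcases hdeg with h | h
        · rcases Nat.lt_or_ge grid.length 3 with _ | _ <;> omega
        · omega
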